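-- pv_equiv track=rewrite | github.com/Ankush904/DLQ_EVENT_BROKER | 01_fetch_dlq_route.py | group_messages_by_route
-- ===== SOURCE A (Python) =====
-- from collections import defaultdict
-- from typing import Any
--
-- JsonDict = dict[str, Any]
--
-- def group_messages_by_route(message_bodies: list[Any]) -> dict[str, list[JsonDict]]:
--     grouped_messages: defaultdict[str, list[JsonDict]] = defaultdict(list)
--
--     for message in message_bodies:
--         if not isinstance(message, dict):
--             continue
--
--         route = message.get("route")
--         if isinstance(route, str) and route:
--             grouped_messages[route].append(message)
--
--     return dict(grouped_messages)
-- ===== SOURCE B (Python) =====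
-- def group_messages_by_route(message_bodies):
--     def route_of(m):
--         if isinstance(m, dict):
--             r = m.get("route")
--             if isinstance(r, str) and r:
--                 return r
--         return None
--
--     routes = list(dict.fromkeys(r for r in map(route_of, message_bodies) if r is not None))
--     return {r: [m for m in message_bodies if route_of(m) == r] for r in routes}
-- ===== Notes on version B (the rewrite author's own statement) =====
-- stated objective: alternative
-- what changed: Replaces A's single defaultdict-bucketing pass with a two-phase plan: first compute the distinct routes in first-seen order via dict.fromkeys, then build each group by an independent filter comprehension over the input.
import Mathlib
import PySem

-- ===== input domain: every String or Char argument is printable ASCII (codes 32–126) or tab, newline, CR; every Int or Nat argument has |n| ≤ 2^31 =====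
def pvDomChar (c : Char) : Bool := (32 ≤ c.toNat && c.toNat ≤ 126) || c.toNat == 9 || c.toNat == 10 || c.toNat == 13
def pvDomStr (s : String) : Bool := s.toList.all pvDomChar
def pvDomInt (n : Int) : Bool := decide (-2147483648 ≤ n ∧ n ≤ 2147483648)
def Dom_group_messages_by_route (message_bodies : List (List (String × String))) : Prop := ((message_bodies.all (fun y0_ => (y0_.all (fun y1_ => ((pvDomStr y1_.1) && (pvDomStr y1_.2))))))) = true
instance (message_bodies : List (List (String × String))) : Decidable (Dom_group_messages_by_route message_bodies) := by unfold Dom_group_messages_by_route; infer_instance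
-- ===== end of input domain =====

-- B replaces A's single defaultdict-bucketing pass by dedup of the route keys followed by one
-- filter per distinct route (alternative decomposition, not faster). Returned groups and their
-- first-seen key order are identical.

-- ===== PORT A =====
-- Literal port of A. Under the type convention every element of message_bodies is a dict,
-- so Python's `isinstance(message, dict)` guard is always true and its `continue` never fires.
def group_messages_by_route (message_bodies : List (List (String × String))) : List (String × List (List (String × String))) :=
  (message_bodies.foldl
    (fun grouped message =>
      match (PySem.Dict.mk message).get? "route" with   -- route = message.get("route")
      | some route =>                                    -- isinstance(route, str) holds by type
          if route ≠ "" then grouped.modify route [] (fun l => l ++ [message])  -- grouped_messages[route].append(message)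
          else grouped
      | none => grouped)
    (PySem.Dict.empty : PySem.Dict String (List (List (String × String))))).items

-- ===== PORT B =====
-- route_of(m): the non-empty str "route" value of m, else None
def pvRouteOf (m : List (String × String)) : Option String :=
  match (PySem.Dict.mk m).get? "route" with
  | some r => if r ≠ "" then some r else none
  | none => none

def group_messages_by_route_alt (message_bodies : List (List (String × String))) : List (String × List (List (String × String))) :=
  -- routes = list(dict.fromkeys(r for r in map(route_of, message_bodies) if r is not None))
  let routes := PySem.List.dedup (message_bodies.filterMap pvRouteOf)
  -- {r: [m for m in message_bodies if route_of(m) == r] for r in routes}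
  routes.map (fun r => (r, message_bodies.filter (fun m => pvRouteOf m == some r)))

-- ===== PRECONDITION & SPEC =====
def Spec_group_messages_by_route (message_bodies : List (List (String × String))) (out : List (String × List (List (String × String)))) : Prop := out = group_messages_by_route_alt message_bodies
instance (message_bodies : List (List (String × String))) (out : List (String × List (List (String × String)))) : Decidable (Spec_group_messages_by_route message_bodies out) := by unfold Spec_group_messages_by_route; infer_instance

-- ===== CLAIM (what is proved, stated in full; the proofs are below) =====
def Claim_equal_group_messages_by_route : Prop := ∀ (message_bodies : List (List (String × String))), Dom_group_messages_by_route message_bodies → Spec_group_messages_by_route message_bodies (group_messages_by_route message_bodies)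

-- ===== LEMMAS AND PROOFS =====

-- the (route, message) pair A's loop acts on, when it acts at all
def pvKeyed (m : List (String × String)) : Option (String × List (String × String)) :=
  (pvRouteOf m).map (fun r => (r, m))

-- A's loop body, rephrased through pvKeyed
theorem pvStepA_eq (grouped : PySem.Dict String (List (List (String × String))))
    (message : List (String × String)) :
    (match (PySem.Dict.mk message).get? "route" with
      | some route =>
          if route ≠ "" then grouped.modify route [] (fun l => l ++ [message])
          else grouped
      | none => grouped)
    = match pvKeyed message with
      | some p => grouped.modify p.1 [] (fun l => l ++ [p.2])
      | none => grouped := by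
  unfold pvKeyed pvRouteOf
  cases (PySem.Dict.mk message).get? "route" with
  | none => simp
  | some r => by_cases h : r = "" <;> simp [h]

-- the keys produced by pvKeyed are exactly the routes
theorem pvKeyed_fst (msgs : List (List (String × String))) :
    (msgs.filterMap pvKeyed).map Prod.fst = msgs.filterMap pvRouteOf := by
  rw [List.map_filterMap]
  apply List.filterMap_congr
  intro m _
  unfold pvKeyed
  cases pvRouteOf m <;> simp

-- the messages that pvKeyed tags with k are exactly those whose route is k
theorem pvKeyed_filter (msgs : List (List (String × String))) (k : String) :
    ((msgs.filterMap pvKeyed).filter (fun p => p.1 == k)).map Prod.snd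
      = msgs.filter (fun m => pvRouteOf m == some k) := by
  induction msgs with
  | nil => simp
  | cons m ms ih =>
      cases h : pvRouteOf m with
      | none =>
          have hp : pvKeyed m = none := by simp [pvKeyed, h]
          simp [hp, h, ih]
      | some r =>
          have hp : pvKeyed m = some (r, m) := by simp [pvKeyed, h]
          by_cases hk : r = k
          · subst hk
            simp [hp, h, ih]
          · have hb : (r == k) = false := by simpa using hk
            have hb2 : (pvRouteOf m == some k) = false := by simp [h, hk]
            simp [hp, hb, hb2, ih]

theorem group_messages_by_route_eq (msgs : List (List (String × String))) :
    group_messages_by_route msgs = group_messages_by_route_alt msgs := by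
  unfold group_messages_by_route
  have hfold :
      msgs.foldl
        (fun grouped message =>
          match (PySem.Dict.mk message).get? "route" with
          | some route =>
              if route ≠ "" then grouped.modify route [] (fun l => l ++ [message])
              else grouped
          | none => grouped)
        (PySem.Dict.empty : PySem.Dict String (List (List (String × String))))
      = (msgs.filterMap pvKeyed).foldl
          (fun grouped p => grouped.modify p.1 [] (fun l => l ++ [p.2]))
          PySem.Dict.empty := by
    rw [List.foldl_filterMap]
    have hfn : (fun (grouped : PySem.Dict String (List (List (String × String)))) message =>
        match (PySem.Dict.mk message).get? "route" with
        | some route =>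
            if route ≠ "" then grouped.modify route [] (fun l => l ++ [message])
            else grouped
        | none => grouped)
      = (fun grouped m =>
          match pvKeyed m with
          | some p => grouped.modify p.1 [] (fun l => l ++ [p.2])
          | none => grouped) := by
      funext grouped m; exact pvStepA_eq grouped m
    rw [hfn]
    congr 1
    funext x y
    cases pvKeyed y <;> rfl
  rw [hfold]
  set d := (msgs.filterMap pvKeyed).foldl
      (fun grouped p => grouped.modify p.1 [] (fun l => l ++ [p.2]))
      (PySem.Dict.empty : PySem.Dict String (List (List (String × String)))) with hd
  have hkeys : d.keys = PySem.Set.ofList (msgs.filterMap pvRouteOf) := by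
    rw [hd]
    rw [PySem.Dict.keys_foldl_modify_key (msgs.filterMap pvKeyed) Prod.fst []
      (fun _ p => fun l => l ++ [p.2]) PySem.Dict.empty]
    rw [PySem.Dict.keys_empty, PySem.Set.update_nil_left, pvKeyed_fst]
  have hnodup : d.keys.Nodup := by
    rw [hd]
    exact PySem.Dict.nodup_keys_foldl_modify_key _ Prod.fst []
      (fun _ p => fun l => l ++ [p.2]) _ (by simp [PySem.Dict.keys_empty])
  rw [PySem.Dict.items_eq_map_keys d hnodup [], hkeys]
  unfold group_messages_by_route_alt
  show _ = (PySem.List.dedup (msgs.filterMap pvRouteOf)).map _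
  rw [show PySem.List.dedup (msgs.filterMap pvRouteOf)
        = PySem.Set.ofList (msgs.filterMap pvRouteOf) from rfl]
  apply List.map_congr_left
  intro k _
  have hget : d.getD k [] = msgs.filter (fun m => pvRouteOf m == some k) := by
    rw [hd, PySem.Dict.getD_foldl_modify_append, PySem.Dict.getD_empty]
    simpa using pvKeyed_filter msgs k
  rw [hget]

-- ===== VERDICT (by name: the statement is the Claim_ definition above) =====
theorem group_messages_by_route_spec : Claim_equal_group_messages_by_route := by
  intro msgs _
  unfold Spec_group_messages_by_route
  exact group_messages_by_route_eq msgs
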